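-- pv_equiv track=rewrite | github.com/sdaveas/telegram-summary-bot | src/utils/utils.py | time_expression_to_seconds
-- ===== SOURCE A (Python) =====
-- def time_expression_to_seconds(expression) -> int:
--     total_seconds = 0
--     current_number = ''
--
--     for char in expression:
--         if char.isdigit():
--             current_number += char
--         else:
--             if current_number:
--                 value = int(current_number)
--                 if char == 'm':
--                     total_seconds += value * 60
--                 elif char == 'h':
--                     total_seconds += value * 3600
--                 elif char == 'd':
--                     total_seconds += value * 86400
--                 current_number = ''
--
--     return total_seconds
-- ===== SOURCE B (Python) =====
-- import re
--
--
-- def time_expression_to_seconds(expression) -> int: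
--     multiplier = {'m': 60, 'h': 3600, 'd': 86400}
--     return sum(int(num) * multiplier[unit]
--                for num, unit in re.findall(r'(\d+)([mhd])', expression))
-- ===== Notes on version B (the rewrite author's own statement) =====
-- stated objective: idiomatic
-- what changed: Replaced the per-character digit-accumulation state machine with regex tokenization (re.findall of (digits, unit) pairs) followed by summing int(num) * multiplier[unit] over a unit->seconds dict.
import Mathlib
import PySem

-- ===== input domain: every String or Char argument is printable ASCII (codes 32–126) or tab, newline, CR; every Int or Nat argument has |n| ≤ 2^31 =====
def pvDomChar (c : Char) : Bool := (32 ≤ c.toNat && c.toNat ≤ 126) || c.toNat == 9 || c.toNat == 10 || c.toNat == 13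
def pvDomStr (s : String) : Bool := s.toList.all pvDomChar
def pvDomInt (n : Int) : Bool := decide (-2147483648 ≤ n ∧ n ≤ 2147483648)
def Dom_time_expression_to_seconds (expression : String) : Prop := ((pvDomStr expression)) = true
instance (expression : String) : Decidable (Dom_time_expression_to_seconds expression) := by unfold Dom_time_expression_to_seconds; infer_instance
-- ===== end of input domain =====

-- B replaces A's per-character digit-accumulation state machine by regex tokenization
-- (re.findall of (number, unit) pairs) followed by a sum — more idiomatic, same cost.

-- int(cs) for a run of decimal digits (the runs are always nonempty digit strings at every
-- call site below, so ofChars? is never none)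
def pvInt (cs : List Char) : Int := (PySem.Int.ofChars? cs).getD 0

-- ===== PORT A =====
def time_expression_to_seconds (expression : String) : Int :=
  (expression.toList.foldl
    (fun (st : Int × List Char) char =>
      if PySem.Chars.isdigit char then
        (st.1, st.2 ++ [char])
      else if st.2 ≠ [] then
        let value := pvInt st.2
        let total :=
          if char = 'm' then st.1 + value * 60
          else if char = 'h' then st.1 + value * 3600
          else if char = 'd' then st.1 + value * 86400
          else st.1
        (total, [])
      else st)
    ((0 : Int), ([] : List Char))).1

-- ===== PORT B =====
-- the dict {'m': 60, 'h': 3600, 'd': 86400}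
def pvMult : PySem.Dict Char Int := PySem.Dict.ofList [('m', 60), ('h', 3600), ('d', 86400)]

-- re.findall(r'(\d+)([mhd])', ·) on the char list, exact on the ASCII domain (where \d is
-- PySem.Chars.isdigit): a maximal digit run immediately followed by a unit letter yields one
-- (int(run), unit) pair, scanning left to right.  A digit run NOT followed by a unit letter
-- contributes no match from any of its suffixes either (each suffix is followed by the same
-- non-unit character), so the scan resumes after the run — exactly what this recursion does.
def pvFindall : List Char → List (Int × Char)
  | [] => []
  | c :: cs =>
    if PySem.Chars.isdigit c then
      match h : (c :: cs).dropWhile PySem.Chars.isdigit with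
      | [] => []
      | u :: rs =>
        if u = 'm' ∨ u = 'h' ∨ u = 'd' then
          (pvInt ((c :: cs).takeWhile PySem.Chars.isdigit), u) :: pvFindall rs
        else
          pvFindall (u :: rs)
    else
      pvFindall cs
termination_by l => l.length
decreasing_by
  · have hd : PySem.Chars.isdigit c = true := by assumption
    have h2 : (c :: cs).dropWhile PySem.Chars.isdigit = cs.dropWhile PySem.Chars.isdigit := by
      simp [hd]
    rw [h2] at h
    have h3 := List.length_dropWhile_le (p := PySem.Chars.isdigit) (l := cs)
    rw [h] at h3
    simp only [List.length_cons] at h3 ⊢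
    omega
  · have hd : PySem.Chars.isdigit c = true := by assumption
    have h2 : (c :: cs).dropWhile PySem.Chars.isdigit = cs.dropWhile PySem.Chars.isdigit := by
      simp [hd]
    rw [h2] at h
    have h3 := List.length_dropWhile_le (p := PySem.Chars.isdigit) (l := cs)
    rw [h] at h3
    simp only [List.length_cons] at h3 ⊢
    omega
  · simp

-- sum(int(num) * multiplier[unit] for num, unit in findall(...)); unit is always one of
-- 'm'/'h'/'d' here, so the dict lookup is never none
def time_expression_to_seconds_alt (expression : String) : Int :=
  ((pvFindall expression.toList).map
    (fun p => p.1 * (PySem.Dict.get? pvMult p.2).getD 0)).sum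

-- ===== PRECONDITION & SPEC =====
def Spec_time_expression_to_seconds (expression : String) (out : Int) : Prop := out = time_expression_to_seconds_alt expression
instance (expression : String) (out : Int) : Decidable (Spec_time_expression_to_seconds expression out) := by unfold Spec_time_expression_to_seconds; infer_instance

-- ===== CLAIM (what is proved, stated in full; the proofs are below) =====
def Claim_equal_time_expression_to_seconds : Prop := ∀ (expression : String), Dom_time_expression_to_seconds expression → Spec_time_expression_to_seconds expression (time_expression_to_seconds expression)

-- ===== LEMMAS AND PROOFS =====

-- a non-digit (hence non-matching) leading char is skipped by the scan
theorem findall_cons_nondigit {c : Char} {cs : List Char}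
    (hc : PySem.Chars.isdigit c = false) : pvFindall (c :: cs) = pvFindall cs := by
  rw [pvFindall.eq_def]
  simp [hc]

-- a string of digits only contains no match
theorem findall_all_digits {l : List Char}
    (hl : ∀ x ∈ l, PySem.Chars.isdigit x = true) : pvFindall l = [] := by
  cases l with
  | nil => simp [pvFindall]
  | cons c cs =>
    rw [pvFindall.eq_def]
    have hdw : (c :: cs).dropWhile PySem.Chars.isdigit = [] :=
      List.dropWhile_eq_nil_iff.mpr (by intro x hx; exact hl x hx)
    simp only [hl c (by simp), if_true]
    split
    · rfl
    · rename_i u rs h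
      rw [hdw] at h
      exact absurd h (by simp)

-- how the scan consumes a nonempty digit run followed by a non-digit char
theorem findall_run {cur : List Char} {c : Char} {cs : List Char}
    (hne : cur ≠ []) (hcur : ∀ x ∈ cur, PySem.Chars.isdigit x = true)
    (hc : PySem.Chars.isdigit c = false) :
    pvFindall (cur ++ c :: cs) =
      if c = 'm' ∨ c = 'h' ∨ c = 'd' then (pvInt cur, c) :: pvFindall cs
      else pvFindall cs := by
  obtain ⟨d, ds, rfl⟩ : ∃ d ds, cur = d :: ds := by
    cases cur with
    | nil => exact absurd rfl hne
    | cons d ds => exact ⟨d, ds, rfl⟩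
  have hdw : ((d :: ds) ++ c :: cs).dropWhile PySem.Chars.isdigit = c :: cs := by
    rw [List.dropWhile_append]
    have : (d :: ds).dropWhile PySem.Chars.isdigit = [] :=
      List.dropWhile_eq_nil_iff.mpr (by intro x hx; exact hcur x hx)
    simp [this, hc]
  have htw : ((d :: ds) ++ c :: cs).takeWhile PySem.Chars.isdigit = d :: ds := by
    rw [List.takeWhile_append]
    have : (d :: ds).takeWhile PySem.Chars.isdigit = d :: ds :=
      List.takeWhile_eq_self_iff.mpr (by intro x hx; exact hcur x hx)
    simp [this, hc]
  rw [List.cons_append, pvFindall.eq_def]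
  simp only [hcur d (by simp), if_true]
  rw [← List.cons_append]
  split
  · rename_i h; rw [hdw] at h; exact absurd h (by simp)
  · rename_i u rs h
    rw [hdw] at h
    obtain ⟨rfl, rfl⟩ : u = c ∧ rs = cs := by
      constructor <;> [exact (List.cons.injEq .. ▸ h).1.symm ▸ rfl; skip]
      · exact ((List.cons.inj h.symm).2)
    rw [htw]
    split <;> [rfl; exact findall_cons_nondigit hc]

-- B's total over a suffix of the input
def tokSum (l : List Char) : Int :=
  ((pvFindall l).map (fun p => p.1 * (PySem.Dict.get? pvMult p.2).getD 0)).sum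

-- the loop invariant of A's fold: with a pending all-digit run `cur`, the final total is the
-- running total plus B's token sum of `cur` re-prepended to the remaining input
theorem loop_inv (l : List Char) (total : Int) (cur : List Char)
    (hcur : ∀ x ∈ cur, PySem.Chars.isdigit x = true) :
    (l.foldl
      (fun (st : Int × List Char) char =>
        if PySem.Chars.isdigit char then
          (st.1, st.2 ++ [char])
        else if st.2 ≠ [] then
          let value := pvInt st.2
          let total :=
            if char = 'm' then st.1 + value * 60
            else if char = 'h' then st.1 + value * 3600
            else if char = 'd' then st.1 + value * 86400
            else st.1
          (total, [])
        else st)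
      (total, cur)).1 = total + tokSum (cur ++ l) := by
  induction l generalizing total cur with
  | nil =>
    simp [tokSum, findall_all_digits hcur]
  | cons c cs ih =>
    rw [List.foldl_cons]
    by_cases hd : PySem.Chars.isdigit c = true
    · simp only [hd, if_true]
      rw [ih total (cur ++ [c]) (by intro x hx; rcases List.mem_append.mp hx with h | h
                                    · exact hcur x h
                                    · simp at h; subst h; exact hd)]
      simp
    · rw [Bool.not_eq_true] at hd
      by_cases hne : cur = []
      · subst hne
        simp only [hd, Bool.false_eq_true, if_false, ne_eq, not_true_eq_false,
          List.nil_append]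
        rw [ih total [] (by simp)]
        rw [tokSum, tokSum, findall_cons_nondigit hd]
        simp
      · simp only [hd, Bool.false_eq_true, if_false, ne_eq, hne, not_false_iff, if_pos]
        rw [ih _ [] (by simp)]
        have hrun := findall_run (cs := cs) hne hcur hd
        rw [List.nil_append, tokSum, tokSum, hrun]
        have km : (PySem.Dict.get? pvMult 'm').getD 0 = (60 : Int) := by decide
        have kh : (PySem.Dict.get? pvMult 'h').getD 0 = (3600 : Int) := by decide
        have kd : (PySem.Dict.get? pvMult 'd').getD 0 = (86400 : Int) := by decide
        by_cases hm : c = 'm'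
        · subst hm; simp [km]; ring
        · by_cases hh : c = 'h'
          · subst hh; simp [kh]; ring
          · by_cases hdd : c = 'd'
            · subst hdd; simp [kd]; ring
            · simp [hm, hh, hdd]

-- ===== VERDICT (by name: the statement is the Claim_ definition above) =====
theorem time_expression_to_seconds_spec : Claim_equal_time_expression_to_seconds := by
  intro expression _
  unfold Spec_time_expression_to_seconds
  rw [time_expression_to_seconds, time_expression_to_seconds_alt,
    loop_inv expression.toList 0 [] (by simp)]
  simp [tokSum]
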